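-- pv_equiv track=rewrite | github.com/huodan/leetcode | datastruct/stack/typing.py | Typing
-- ===== SOURCE A (Python) =====
-- def Typing(s):
-- 	# write code here
-- 	import string
-- 	temp_stack = []
-- 	for i in range(len(s)):
-- 		if s[i] not in string.ascii_lowercase + "<":
-- 			raise Exception("输入数据不符合要求，请输入小写字母或'<'")
-- 		if s[i] != "<":
-- 			temp_stack.append(s[i])
-- 		elif s[i] == "<":
-- 			if len(temp_stack) == 0:
-- 				continue
-- 			else:
-- 				temp_stack.pop()
--
-- 	return "".join(temp_stack)
-- ===== SOURCE B (Python) =====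
-- def Typing(s):
-- 	# write code here
-- 	import string
-- 	valid = set(string.ascii_lowercase + "<")
-- 	for ch in s:
-- 		if ch not in valid:
-- 			raise Exception("输入数据不符合要求，请输入小写字母或'<'")
-- 	out = []
-- 	skip = 0
-- 	for ch in reversed(s):
-- 		if ch == "<":
-- 			skip += 1
-- 		elif skip > 0:
-- 			skip -= 1
-- 		else:
-- 			out.append(ch)
-- 	return "".join(reversed(out))
-- ===== Notes on version B (the rewrite author's own statement) =====
-- stated objective: alternative
-- what changed: Replaces the forward push/pop stack with a single right-to-left pass keeping an integer skip counter: each '<' increments skip, each letter is either swallowed (skip>0) or collected, and the collected letters are reversed at the end; validation becomes a separate up-front pass.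
import Mathlib
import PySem

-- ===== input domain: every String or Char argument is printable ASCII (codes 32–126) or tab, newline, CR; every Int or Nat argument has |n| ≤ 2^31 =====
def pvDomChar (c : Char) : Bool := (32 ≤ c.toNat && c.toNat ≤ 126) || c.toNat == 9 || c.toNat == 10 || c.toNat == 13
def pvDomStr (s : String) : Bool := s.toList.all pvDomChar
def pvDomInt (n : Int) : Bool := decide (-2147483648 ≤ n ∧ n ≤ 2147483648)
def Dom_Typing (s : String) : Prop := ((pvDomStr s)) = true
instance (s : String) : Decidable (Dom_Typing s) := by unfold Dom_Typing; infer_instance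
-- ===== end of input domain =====

-- B re-implements backspace typing with a single right-to-left pass and a skip
-- counter instead of A's forward push/pop stack (objective: alternative decomposition).


-- ===== PORT A =====
-- A's loop body: on an invalid character A raises (excluded by Pre_Typing; that
-- branch returns the stack unchanged here), a letter is pushed, '<' pops unless empty.
def TypingStepA (st : List Char) (c : Char) : List Char :=
  if (('a' ≤ c && c ≤ 'z') || c == '<') = false then st
  else if c ≠ '<' then st ++ [c]
  else if st.length = 0 then st
  else st.dropLast

def Typing (s : String) : String :=
  String.mk (s.toList.foldl TypingStepA [])

-- ===== PORT B =====
-- B's right-to-left loop body: '<' bumps the skip counter, a letter is either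
-- swallowed (skip > 0) or collected.
def TypingStepB (st : List Char × Nat) (c : Char) : List Char × Nat :=
  if c = '<' then (st.1, st.2 + 1)
  else if st.2 > 0 then (st.1, st.2 - 1)
  else (st.1 ++ [c], st.2)

def Typing_alt (s : String) : String :=
  -- Source B's up-front validation raises on an invalid character (excluded by
  -- Pre_Typing); that unreachable branch returns "" here.
  if s.toList.all (fun c => ('a' ≤ c && c ≤ 'z') || c == '<') then
    String.mk ((s.toList.reverse.foldl TypingStepB ([], 0)).1.reverse)
  else ""

-- ===== PRECONDITION & SPEC =====
-- Pre_ excludes exactly the inputs on which both A and B raise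
-- Exception("输入数据不符合要求，请输入小写字母或'<'"): any character that is
-- neither a lowercase ASCII letter nor '<'.
def Pre_Typing (s : String) : Prop := (s.toList.all (fun c => ('a' ≤ c && c ≤ 'z') || c == '<')) = true
instance (s : String) : Decidable (Pre_Typing s) := by unfold Pre_Typing; infer_instance
def pvWitness_Typing : String := "ab<c<<x"

def Spec_Typing (s : String) (out : String) : Prop := out = Typing_alt s
instance (s : String) (out : String) : Decidable (Spec_Typing s out) := by unfold Spec_Typing; infer_instance

-- ===== CLAIM (what is proved, stated in full; the proofs are below) =====
def Claim_equal_Typing : Prop := ∀ (s : String), Dom_Typing s → Pre_Typing s → Spec_Typing s (Typing s)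

-- ===== LEMMAS AND PROOFS =====

-- Loop invariant for B: processing r (a reversed segment) from state (acc, k)
-- appends to acc the reversal of A's stack on r.reverse with its last k entries removed.
def pvValid (c : Char) : Bool := ('a' ≤ c && c ≤ 'z') || c == '<'

theorem invB (r : List Char) : ∀ (acc : List Char) (k : Nat), (∀ c ∈ r, pvValid c = true) →
    (r.foldl TypingStepB (acc, k)).1 =
      acc ++ (let T := (r.reverse).foldl TypingStepA [];
              (T.take (T.length - k)).reverse) := by
  induction r with
  | nil => intro acc k _; simp
  | cons c r' ihv =>
    intro acc k hval
    have hvc : (('a' ≤ c && c ≤ 'z') || c == '<') = true := by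
      have := hval c (by simp)
      unfold pvValid at this
      exact this
    have ih : ∀ (acc : List Char) (k : Nat),
        (r'.foldl TypingStepB (acc, k)).1 =
          acc ++ (let T := (r'.reverse).foldl TypingStepA [];
                  (T.take (T.length - k)).reverse) :=
      fun acc k => ihv acc k (fun x hx => hval x (by simp [hx]))
    have hrev : (c :: r').reverse = r'.reverse ++ [c] := by simp
    simp only [List.foldl_cons, hrev, List.foldl_append, List.foldl_cons, List.foldl_nil]
    set T := (r'.reverse).foldl TypingStepA [] with hT
    by_cases hc : c = '<'
    · subst hc
      rw [show TypingStepB (acc, k) '<' = (acc, k + 1) by unfold TypingStepB; simp]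
      rw [ih acc (k + 1)]
      rw [show TypingStepA T '<' = (if T.length = 0 then T else T.dropLast) by
        unfold TypingStepA; simp]
      by_cases hT0 : T.length = 0
      · rw [List.length_eq_zero_iff] at hT0
        simp [hT0]
      · rw [if_neg hT0]
        have hgen : T.dropLast.take (T.dropLast.length - k) = T.take (T.length - (k + 1)) := by
          rw [List.dropLast_eq_take, List.take_take, List.length_take]
          congr 1
          omega
        rw [hgen]
    · have hstepA : TypingStepA T c = T ++ [c] := by
        unfold TypingStepA
        simp [hvc, hc]
      rw [hstepA]
      by_cases hk : k > 0
      · rw [show TypingStepB (acc, k) c = (acc, k - 1) by unfold TypingStepB; simp [hc, hk]]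
        rw [ih acc (k - 1)]
        have htake : (T ++ [c]).take ((T ++ [c]).length - k) = T.take (T.length - (k - 1)) := by
          rw [List.take_append_of_le_length (by simp; omega)]
          congr 1
          simp
          omega
        rw [htake]
      · have hk0 : k = 0 := by omega
        subst hk0
        rw [show TypingStepB (acc, 0) c = (acc ++ [c], 0) by unfold TypingStepB; simp [hc]]
        rw [ih (acc ++ [c]) 0]
        rw [List.take_of_length_le (by simp)]
        simp

theorem Typing_spec : Claim_equal_Typing := by
  intro s _ hpre
  unfold Spec_Typing Typing Typing_alt
  unfold Pre_Typing at hpre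
  rw [if_pos hpre]
  rw [List.all_eq_true] at hpre
  rw [invB _ _ _ (fun c hc => by
    unfold pvValid
    exact hpre c (List.mem_reverse.mp hc))]
  simp only [List.reverse_reverse, List.nil_append, Nat.sub_zero, List.take_length,
    List.reverse_reverse]
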